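-- pv_equiv track=rewrite | github.com/xwmtp/advent-of-code-2021 | Day15/day15.py | get_x5_height
-- ===== SOURCE A (Python) =====
-- def get_x5_height(rows):
--     total_new_rows = [row.copy() for row in rows]
--     prev_rows = [row.copy() for row in rows]
--     for _ in range(4):
--         added_rows = []
--         for row in prev_rows:
--             new_row = increased_row(row)
--             total_new_rows.append(new_row)
--             added_rows.append(new_row)
--         prev_rows = added_rows
--     return total_new_rows
--
-- def increased_row(row):
--     return [max(1, (num + 1) % 10) for num in row]
-- ===== SOURCE B (Python) =====
-- def get_x5_height(rows):
--     # Each tile t (1..4) is computed directly from the original rows by a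
--     # closed-form shift within the 1..9 cycle, instead of chaining tiles.
--     out = [row.copy() for row in rows]
--     out += [[(max(1, (num + 1) % 10) - 1 + (t - 1)) % 9 + 1 for num in row]
--             for t in range(1, 5) for row in rows]
--     return out
-- ===== Notes on version B (the rewrite author's own statement) =====
-- stated objective: simpler
-- what changed: Replaces the chained prev_rows accumulation (each tile derived from the previous tile) by computing every tile t independently from the original rows with a closed-form shift ((max(1,(num+1)%10)-1+(t-1))%9)+1 in the 1..9 cycle.
import Mathlib
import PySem

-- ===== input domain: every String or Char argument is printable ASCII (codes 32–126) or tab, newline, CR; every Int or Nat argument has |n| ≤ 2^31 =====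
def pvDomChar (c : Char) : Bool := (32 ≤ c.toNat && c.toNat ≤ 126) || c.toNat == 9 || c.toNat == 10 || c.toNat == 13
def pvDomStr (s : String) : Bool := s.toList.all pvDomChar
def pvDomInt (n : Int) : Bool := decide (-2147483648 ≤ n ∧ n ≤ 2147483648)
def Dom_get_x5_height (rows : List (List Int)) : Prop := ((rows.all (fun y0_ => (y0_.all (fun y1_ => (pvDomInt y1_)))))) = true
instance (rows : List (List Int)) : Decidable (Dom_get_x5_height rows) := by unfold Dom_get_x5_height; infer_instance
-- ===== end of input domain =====

-- B computes each of the 4 extra tiles directly from the original rows by a closed-form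
-- shift in the 1..9 cycle (simpler: no chained prev_rows accumulation); return values proved equal.

-- ===== PORT A =====
def increasedRow (row : List Int) : List Int :=
  row.map (fun num => max 1 (PySem.Int.mod (num + 1) 10))

def get_x5_height (rows : List (List Int)) : List (List Int) :=
  -- total_new_rows = copies of rows; prev_rows = copies of rows
  -- for _ in range(4): added = [increased_row r for r in prev]; total += added; prev = added
  ((List.range 4).foldl
    (fun (st : List (List Int) × List (List Int)) _ =>
      let added := st.2.map increasedRow
      (st.1 ++ added, added))
    (rows.map (fun r => r), rows.map (fun r => r))).1

-- ===== PORT B =====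
def tileRow (t : Int) (row : List Int) : List Int :=
  row.map (fun num => PySem.Int.mod (max 1 (PySem.Int.mod (num + 1) 10) - 1 + (t - 1)) 9 + 1)

def get_x5_height_alt (rows : List (List Int)) : List (List Int) :=
  rows.map (fun r => r) ++
    (PySem.List.pyRange 1 5 1).flatMap (fun t => rows.map (tileRow t))

-- ===== PRECONDITION & SPEC =====
def Spec_get_x5_height (rows : List (List Int)) (out : List (List Int)) : Prop := out = get_x5_height_alt rows
instance (rows : List (List Int)) (out : List (List Int)) : Decidable (Spec_get_x5_height rows out) := by unfold Spec_get_x5_height; infer_instance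

-- ===== CLAIM (what is proved, stated in full; the proofs are below) =====
def Claim_equal_get_x5_height : Prop := ∀ (rows : List (List Int)), Dom_get_x5_height rows → Spec_get_x5_height rows (get_x5_height rows)

-- ===== LEMMAS AND PROOFS =====

theorem inc_eq_tile1 (r : List Int) : increasedRow r = tileRow 1 r := by
  unfold increasedRow tileRow
  refine List.map_congr_left (fun n _ => ?_)
  rw [PySem.Int.mod_eq_emod_of_pos (by norm_num : (0:Int) < 10),
      PySem.Int.mod_eq_emod_of_pos (by norm_num : (0:Int) < 9)]
  omega

theorem inc_tile (t : Int) (r : List Int) : increasedRow (tileRow t r) = tileRow (t + 1) r := by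
  unfold increasedRow tileRow
  rw [List.map_map]
  refine List.map_congr_left (fun n _ => ?_)
  simp only [Function.comp]
  rw [PySem.Int.mod_eq_emod_of_pos (by norm_num : (0:Int) < 10),
      PySem.Int.mod_eq_emod_of_pos (by norm_num : (0:Int) < 10),
      PySem.Int.mod_eq_emod_of_pos (by norm_num : (0:Int) < 9),
      PySem.Int.mod_eq_emod_of_pos (by norm_num : (0:Int) < 9)]
  omega

theorem map_inc_tile (t : Int) (rows : List (List Int)) :
    (rows.map (tileRow t)).map increasedRow = rows.map (tileRow (t + 1)) := by
  rw [List.map_map]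
  exact List.map_congr_left (fun r _ => inc_tile t r)

-- ===== VERDICT (by name: the statement is the Claim_ definition above) =====
theorem get_x5_height_spec : Claim_equal_get_x5_height := by
  intro rows _
  show get_x5_height rows = get_x5_height_alt rows
  unfold get_x5_height get_x5_height_alt
  have h1 : rows.map increasedRow = rows.map (tileRow 1) :=
    List.map_congr_left (fun r _ => inc_eq_tile1 r)
  have e : (rows.map (fun r => r)).map increasedRow = rows.map (tileRow 1) := by
    rw [List.map_map]; simpa using h1
  have hr : PySem.List.pyRange 1 5 1 = [1, 2, 3, 4] := by decide
  simp only [List.range, List.range.loop, List.foldl, hr,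
    List.flatMap_cons, List.flatMap_nil, e, map_inc_tile]
  norm_num [List.append_assoc]
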